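-- pv_equiv track=rewrite | github.com/KarolBurczyk/CoursesUwr | 6 sem/SI/Pracownia3/z1_1.py | generate_line_possibilities
-- ===== SOURCE A (Python) =====
-- def generate_line_possibilities(length, clues):
--     """Generuj wszystkie możliwe układy 0/1 spełniające ograniczenia."""
--     if not clues:
--         return {tuple([0]*length)}
--
--     positions = []
--     total_blocks = sum(clues)
--     min_required = total_blocks + len(clues) - 1
--     if min_required > length:
--         return set()
--
--     first, *rest = clues
--     possibilities = set()
--
--     for start in range(length - min_required + 1):
--         prefix = [0]*start + [1]*first
--         if rest:
--             prefix += [0]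
--             for suffix in generate_line_possibilities(length - len(prefix), rest):
--                 possibilities.add(tuple(prefix + list(suffix)))
--         else:
--             suffix = [0]*(length - len(prefix))
--             possibilities.add(tuple(prefix + suffix))
--     return possibilities
-- ===== SOURCE B (Python) =====
-- def generate_line_possibilities(length, clues):
--     """Same sets as A, but top-down DP: each (remaining length, clue-suffix)
--     subproblem is solved once and cached (a suffix is identified by its length)."""
--     memo = {}
--
--     def solve(rem, cs):
--         key = (rem, len(cs))
--         if key in memo:
--             return memo[key]
--         if not cs:
--             res = {tuple([0] * rem)}
--         else:
--             first, rest = cs[0], cs[1:]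
--             min_required = sum(cs) + len(cs) - 1
--             res = set()
--             if min_required <= rem:
--                 for start in range(rem - min_required + 1):
--                     prefix = [0] * start + [1] * first
--                     if rest:
--                         prefix = prefix + [0]
--                         for suffix in solve(rem - len(prefix), rest):
--                             res.add(tuple(prefix) + suffix)
--                     else:
--                         res.add(tuple(prefix + [0] * (rem - len(prefix))))
--         memo[key] = res
--         return res
--
--     return solve(length, clues)
-- ===== Notes on version B (the rewrite author's own statement) =====
-- stated objective: faster
-- what changed: Top-down dynamic programming: subproblem result sets are cached in a dict keyed by (remaining length, clue-suffix length), so each of the O(length*len(clues)) distinct subproblems is solved once instead of being recomputed exponentially often by A's plain recursion.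
import Mathlib
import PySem

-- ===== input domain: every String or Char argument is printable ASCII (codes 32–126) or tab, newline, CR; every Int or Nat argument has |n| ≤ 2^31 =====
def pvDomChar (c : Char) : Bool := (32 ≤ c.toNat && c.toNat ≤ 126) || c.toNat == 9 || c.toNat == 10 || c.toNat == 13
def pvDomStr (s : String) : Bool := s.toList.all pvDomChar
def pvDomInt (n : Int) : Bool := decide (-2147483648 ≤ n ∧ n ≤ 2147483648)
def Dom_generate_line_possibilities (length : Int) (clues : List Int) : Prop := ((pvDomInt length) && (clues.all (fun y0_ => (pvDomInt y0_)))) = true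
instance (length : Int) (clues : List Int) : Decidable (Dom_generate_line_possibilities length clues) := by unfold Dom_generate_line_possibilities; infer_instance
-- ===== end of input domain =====

-- B replaces A's plain recursion by top-down dynamic programming (a memo dict keyed by
-- (remaining length, clue-suffix length)), solving each distinct subproblem once; objective: faster.

-- ===== PORT A =====
def generate_line_possibilities (length : Int) (clues : List Int) : List (List Int) :=
  match clues with
  | [] => PySem.Set.ofList [List.replicate length.toNat 0]
  | first :: rest =>
    let total_blocks := (first :: rest).sum
    let min_required := total_blocks + ((rest.length : Int) + 1) - 1
    if min_required > length then []
    else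
      (PySem.List.pyRange 0 (length - min_required + 1) 1).foldl
        (fun possibilities start =>
          let pfx := List.replicate start.toNat 0 ++ List.replicate first.toNat 1
          if rest ≠ [] then
            let pfx2 := pfx ++ [0]
            (generate_line_possibilities (length - (pfx2.length : Int)) rest).foldl
              (fun poss suffix => PySem.Set.add poss (pfx2 ++ suffix)) possibilities
          else
            PySem.Set.add possibilities
              (pfx ++ List.replicate (length - (pfx.length : Int)).toNat 0))
        []
  termination_by clues.length
  decreasing_by simp

-- ===== PORT B =====
-- memo dict, threaded through the recursion as state
def glpMemo : Type := PySem.Dict (Int × Nat) (List (List Int))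

def glpSolve (rem : Int) (cs : List Int) (memo : glpMemo) : List (List Int) × glpMemo :=
  match PySem.Dict.get? memo (rem, cs.length) with
  | some v => (v, memo)
  | none =>
    match cs with
    | [] =>
      let res := PySem.Set.ofList [List.replicate rem.toNat 0]
      (res, PySem.Dict.insert memo (rem, 0) res)
    | first :: rest =>
      let min_required := (first :: rest).sum + ((rest.length : Int) + 1) - 1
      let p :=
        if min_required ≤ rem then
          (PySem.List.pyRange 0 (rem - min_required + 1) 1).foldl
            (fun (p : List (List Int) × glpMemo) start =>
              let pfx := List.replicate start.toNat 0 ++ List.replicate first.toNat 1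
              if rest ≠ [] then
                let pfx2 := pfx ++ [0]
                let q := glpSolve (rem - (pfx2.length : Int)) rest p.2
                (q.1.foldl (fun res suffix => PySem.Set.add res (pfx2 ++ suffix)) p.1, q.2)
              else
                (PySem.Set.add p.1
                  (pfx ++ List.replicate (rem - (pfx.length : Int)).toNat 0), p.2))
            ([], memo)
        else ([], memo)
      (p.1, PySem.Dict.insert p.2 (rem, rest.length + 1) p.1)
  termination_by cs.length
  decreasing_by simp

def generate_line_possibilities_alt (length : Int) (clues : List Int) : List (List Int) :=
  (glpSolve length clues PySem.Dict.empty).1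

-- ===== PRECONDITION & SPEC =====
def Spec_generate_line_possibilities (length : Int) (clues : List Int) (out : List (List Int)) : Prop := out = generate_line_possibilities_alt length clues
instance (length : Int) (clues : List Int) (out : List (List Int)) : Decidable (Spec_generate_line_possibilities length clues out) := by unfold Spec_generate_line_possibilities; infer_instance

-- ===== CLAIM (what is proved, stated in full; the proofs are below) =====
def Claim_equal_generate_line_possibilities : Prop := ∀ (length : Int) (clues : List Int), Dom_generate_line_possibilities length clues → Spec_generate_line_possibilities length clues (generate_line_possibilities length clues)

-- ===== LEMMAS AND PROOFS =====

-- memo invariant: every cached entry (rem, k) holds A's answer for the length-k suffix of clues0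
def glpGood (clues0 : List Int) (m : glpMemo) : Prop :=
  ∀ rem k v, PySem.Dict.get? m (rem, k) = some v →
    k ≤ clues0.length ∧ v = generate_line_possibilities rem (clues0.drop (clues0.length - k))

lemma glp_drop_of_suffix {cs clues0 : List Int} (h : cs <:+ clues0) :
    clues0.drop (clues0.length - cs.length) = cs := by
  obtain ⟨t, rfl⟩ := h
  simp

lemma glpGood_empty (clues0 : List Int) : glpGood clues0 PySem.Dict.empty := by
  intro rem k v h
  simp [PySem.Dict.get?, PySem.Dict.empty] at h

lemma glpGood_insert {clues0 cs : List Int} {m : glpMemo} {rem : Int}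
    (hm : glpGood clues0 m) (hsuf : cs <:+ clues0)
    {res : List (List Int)} (hres : res = generate_line_possibilities rem cs) :
    glpGood clues0 (PySem.Dict.insert m (rem, cs.length) res) := by
  intro rem' k v h
  by_cases hk : (rem', k) = (rem, cs.length)
  · rw [hk, PySem.Dict.get?_insert_self] at h
    obtain ⟨h1, h2⟩ := Prod.mk.injEq .. ▸ hk
    refine ⟨h2 ▸ hsuf.length_le, ?_⟩
    rw [h2, glp_drop_of_suffix hsuf, h1, ← hres]
    exact (Option.some.injEq .. ▸ h).symm
  · rw [PySem.Dict.get?_insert_of_ne _ _ hk] at h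
    exact hm rem' k v h

lemma glpSolve_correct (clues0 : List Int) :
    ∀ (cs : List Int) (rem : Int) (m : glpMemo), cs <:+ clues0 → glpGood clues0 m →
      (glpSolve rem cs m).1 = generate_line_possibilities rem cs ∧
      glpGood clues0 (glpSolve rem cs m).2 := by
  intro cs
  induction cs with
  | nil =>
    intro rem m hsuf hm
    rw [glpSolve]
    cases hget : PySem.Dict.get? m (rem, ([] : List Int).length) with
    | some v =>
      have := hm rem 0 v (by simpa using hget)
      refine ⟨?_, hm⟩
      rw [this.2]
      simp
    | none =>
      refine ⟨?_, ?_⟩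
      · simp [generate_line_possibilities]
      · exact glpGood_insert hm hsuf (by simp [generate_line_possibilities])
  | cons first rest ih =>
    intro rem m hsuf hm
    have hrest : rest <:+ clues0 := (List.suffix_cons first rest).trans hsuf
    rw [glpSolve]
    cases hget : PySem.Dict.get? m (rem, (first :: rest).length) with
    | some v =>
      have := hm rem (first :: rest).length v hget
      exact ⟨by rw [this.2, glp_drop_of_suffix hsuf], hm⟩
    | none =>
      dsimp only
      set min_required := (first :: rest).sum + ((rest.length : Int) + 1) - 1 with hmr
      by_cases hle : min_required ≤ rem
      · -- the loop runs; prove the fold invariant over the range list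
        have hfold : ∀ (L : List Int) (acc : List (List Int)) (m0 : glpMemo), glpGood clues0 m0 →
            (L.foldl
              (fun (p : List (List Int) × glpMemo) start =>
                if rest ≠ [] then
                  (List.foldl
                    (fun res suffix => PySem.Set.add res
                      (List.replicate start.toNat (0:Int) ++ List.replicate first.toNat 1 ++ [0] ++ suffix))
                    p.1
                    (glpSolve (rem - ((List.replicate start.toNat (0:Int) ++ List.replicate first.toNat 1 ++ [0]).length : Int)) rest p.2).1,
                   (glpSolve (rem - ((List.replicate start.toNat (0:Int) ++ List.replicate first.toNat 1 ++ [0]).length : Int)) rest p.2).2)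
                else
                  (PySem.Set.add p.1
                    (List.replicate start.toNat (0:Int) ++ List.replicate first.toNat 1 ++
                      List.replicate (rem - ((List.replicate start.toNat (0:Int) ++ List.replicate first.toNat 1).length : Int)).toNat 0), p.2))
              (acc, m0)).1 =
            L.foldl
              (fun possibilities start =>
                if rest ≠ [] then
                  List.foldl
                    (fun poss suffix => PySem.Set.add poss
                      (List.replicate start.toNat (0:Int) ++ List.replicate first.toNat 1 ++ [0] ++ suffix))
                    possibilities
                    (generate_line_possibilities (rem - ((List.replicate start.toNat (0:Int) ++ List.replicate first.toNat 1 ++ [0]).length : Int)) rest)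
                else
                  PySem.Set.add possibilities
                    (List.replicate start.toNat (0:Int) ++ List.replicate first.toNat 1 ++
                      List.replicate (rem - ((List.replicate start.toNat (0:Int) ++ List.replicate first.toNat 1).length : Int)).toNat 0))
              acc ∧
            glpGood clues0
              (L.foldl
                (fun (p : List (List Int) × glpMemo) start =>
                  if rest ≠ [] then
                    (List.foldl
                      (fun res suffix => PySem.Set.add res
                        (List.replicate start.toNat (0:Int) ++ List.replicate first.toNat 1 ++ [0] ++ suffix))
                      p.1
                      (glpSolve (rem - ((List.replicate start.toNat (0:Int) ++ List.replicate first.toNat 1 ++ [0]).length : Int)) rest p.2).1,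
                     (glpSolve (rem - ((List.replicate start.toNat (0:Int) ++ List.replicate first.toNat 1 ++ [0]).length : Int)) rest p.2).2)
                  else
                    (PySem.Set.add p.1
                      (List.replicate start.toNat (0:Int) ++ List.replicate first.toNat 1 ++
                        List.replicate (rem - ((List.replicate start.toNat (0:Int) ++ List.replicate first.toNat 1).length : Int)).toNat 0), p.2))
                (acc, m0)).2 := by
          intro L
          induction L with
          | nil => intro acc m0 hm0; exact ⟨rfl, hm0⟩
          | cons x L ihL =>
            intro acc m0 hm0
            simp only [List.foldl_cons]
            by_cases hrne : rest ≠ []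
            · rw [if_pos hrne, if_pos hrne]
              have hq := ih (rem - ((List.replicate x.toNat (0:Int) ++ List.replicate first.toNat (1:Int) ++ [(0:Int)]).length : Int)) m0 hrest hm0
              rw [hq.1]
              exact ihL _ _ hq.2
            · rw [if_neg hrne, if_neg hrne]
              exact ihL _ _ hm0
        have h1 := hfold (PySem.List.pyRange 0 (rem - min_required + 1) 1) [] m hm
        have hA : generate_line_possibilities rem (first :: rest) =
            (PySem.List.pyRange 0 (rem - min_required + 1) 1).foldl
              (fun possibilities start =>
                if rest ≠ [] then
                  List.foldl
                    (fun poss suffix => PySem.Set.add poss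
                      (List.replicate start.toNat (0:Int) ++ List.replicate first.toNat 1 ++ [0] ++ suffix))
                    possibilities
                    (generate_line_possibilities (rem - ((List.replicate start.toNat (0:Int) ++ List.replicate first.toNat 1 ++ [0]).length : Int)) rest)
                else
                  PySem.Set.add possibilities
                    (List.replicate start.toNat (0:Int) ++ List.replicate first.toNat 1 ++
                      List.replicate (rem - ((List.replicate start.toNat (0:Int) ++ List.replicate first.toNat 1).length : Int)).toNat 0))
              [] := by
          rw [generate_line_possibilities]
          simp only [← hmr, if_neg (by omega : ¬ min_required > rem)]
        rw [if_pos hle]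
        refine ⟨?_, ?_⟩
        · rw [h1.1, ← hA]
        · exact glpGood_insert h1.2 hsuf (by rw [h1.1, ← hA])
      · rw [if_neg hle]
        have hA : generate_line_possibilities rem (first :: rest) = [] := by
          rw [generate_line_possibilities]
          simp only [← hmr, if_pos (by omega : min_required > rem)]
        exact ⟨hA.symm, glpGood_insert hm hsuf hA.symm⟩

-- ===== VERDICT (by name: the statement is the Claim_ definition above) =====
theorem generate_line_possibilities_spec : Claim_equal_generate_line_possibilities := by
  intro length clues _
  unfold Spec_generate_line_possibilities generate_line_possibilities_alt
  exact (glpSolve_correct clues clues length PySem.Dict.empty (List.suffix_refl clues)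
    (glpGood_empty clues)).1.symm
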